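-- pv_equiv track=rewrite | github.com/RolnickLab/SatBird | src/trainer/state_trainer.py | get_nb_bands
-- ===== SOURCE A (Python) =====
-- def get_nb_bands(bands):
--     n = 0
--     for b in bands:
--         if b in ["r","g","b","nir"]:
--             n+=1
--         elif b == "ped":
--             n+=8
--         elif b == "bioclim":
--             n+= 19
--         elif b == "rgb":
--             n+=3
--     return(n)
-- ===== SOURCE B (Python) =====
-- WEIGHTS = {"r": 1, "g": 1, "b": 1, "nir": 1, "ped": 8, "bioclim": 19, "rgb": 3}
--
-- def get_nb_bands(bands):
--     counts = {}
--     for b in bands: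
--         counts[b] = counts.get(b, 0) + 1
--     return sum(WEIGHTS.get(b, 0) * c for b, c in counts.items())
-- ===== Notes on version B (the rewrite author's own statement) =====
-- stated objective: alternative
-- what changed: B replaces A's per-element if/elif classification with a frequency table built in one pass plus a single weighted sum over the distinct band keys looked up in a weights mapping.
import Mathlib
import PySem

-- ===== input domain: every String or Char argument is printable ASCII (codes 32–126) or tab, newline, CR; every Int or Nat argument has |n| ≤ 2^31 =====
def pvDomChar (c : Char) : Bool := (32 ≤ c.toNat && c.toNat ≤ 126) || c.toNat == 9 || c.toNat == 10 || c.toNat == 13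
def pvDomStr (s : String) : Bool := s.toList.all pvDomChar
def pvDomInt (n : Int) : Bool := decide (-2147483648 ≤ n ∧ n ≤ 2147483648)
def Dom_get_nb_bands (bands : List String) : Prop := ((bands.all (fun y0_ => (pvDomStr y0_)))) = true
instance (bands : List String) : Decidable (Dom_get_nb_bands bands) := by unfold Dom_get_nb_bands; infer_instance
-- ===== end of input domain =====

-- B tabulates band occurrences in a dict first and then makes one weighted pass over the
-- distinct band keys with a weights mapping, instead of A's per-element if/elif chain.

-- ===== PORT A =====
def get_nb_bands (bands : List String) : Int :=
  bands.foldl (fun n b =>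
    if ["r", "g", "b", "nir"].contains b then n + 1
    else if b = "ped" then n + 8
    else if b = "bioclim" then n + 19
    else if b = "rgb" then n + 3
    else n) 0

-- ===== PORT B =====
def pvWeights : PySem.Dict String Int :=
  PySem.Dict.ofList [("r", 1), ("g", 1), ("b", 1), ("nir", 1), ("ped", 8), ("bioclim", 19), ("rgb", 3)]

def get_nb_bands_alt (bands : List String) : Int :=
  let counts := bands.foldl (fun d b => d.insert b (d.getD b 0 + 1)) PySem.Dict.empty
  counts.items.foldl (fun acc p => acc + pvWeights.getD p.1 0 * p.2) 0

-- ===== PRECONDITION & SPEC =====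
def Spec_get_nb_bands (bands : List String) (out : Int) : Prop := out = get_nb_bands_alt bands
instance (bands : List String) (out : Int) : Decidable (Spec_get_nb_bands bands out) := by unfold Spec_get_nb_bands; infer_instance

-- ===== CLAIM (what is proved, stated in full; the proofs are below) =====
def Claim_equal_get_nb_bands : Prop := ∀ (bands : List String), Dom_get_nb_bands bands → Spec_get_nb_bands bands (get_nb_bands bands)

-- ===== LEMMAS AND PROOFS =====

/-- The weight A's if/elif chain adds for a single band. -/
def pvW (b : String) : Int :=
  if ["r", "g", "b", "nir"].contains b then 1
  else if b = "ped" then 8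
  else if b = "bioclim" then 19
  else if b = "rgb" then 3
  else 0

theorem pvWeights_eq_mk : pvWeights =
    PySem.Dict.mk [("r", 1), ("g", 1), ("b", 1), ("nir", 1), ("ped", 8), ("bioclim", 19), ("rgb", 3)] := by
  decide

theorem pvWeights_getD (k : String) : pvWeights.getD k 0 = pvW k := by
  by_cases h1 : k = "r"; · subst h1; decide
  by_cases h2 : k = "g"; · subst h2; decide
  by_cases h3 : k = "b"; · subst h3; decide
  by_cases h4 : k = "nir"; · subst h4; decide
  by_cases h5 : k = "ped"; · subst h5; decide
  by_cases h6 : k = "bioclim"; · subst h6; decide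
  by_cases h7 : k = "rgb"; · subst h7; decide
  rw [pvWeights_eq_mk]
  simp [pvW, PySem.Dict.getD_eq_get?_getD, PySem.Dict.get?,
    h1, h2, h3, h4, h5, h6, h7, Ne.symm h1, Ne.symm h2, Ne.symm h3, Ne.symm h4,
    Ne.symm h5, Ne.symm h6, Ne.symm h7]

theorem portA_eq_sum (bands : List String) : get_nb_bands bands = (bands.map pvW).sum := by
  have h : get_nb_bands bands = bands.foldl (fun n b => n + pvW b) 0 := by
    unfold get_nb_bands
    congr 1
    funext n b
    unfold pvW
    split_ifs <;> ring
  rw [h, PySem.List.foldl_add]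
  simp

theorem sum_ite_pick (f : String → Int) (x : String) :
    ∀ (s : List String), s.Nodup → x ∈ s →
      (s.map (fun k => if k = x then f k else 0)).sum = f x := by
  intro s
  induction s with
  | nil => intro _ h; cases h
  | cons a t ih =>
    intro hnd hx
    by_cases hax : a = x
    · subst hax
      have hna : a ∉ t := (List.nodup_cons.mp hnd).1
      have hz : ∀ y ∈ t.map (fun k => if k = a then f k else 0), y = 0 := by
        intro y hy
        rcases List.mem_map.mp hy with ⟨k, hk, rfl⟩
        have : k ≠ a := fun he => hna (he ▸ hk)
        simp [this]
      simp [List.sum_eq_zero hz]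
    · have hx' : x ∈ t := by
        rcases List.mem_cons.mp hx with h | h
        · exact absurd h.symm hax
        · exact h
      simp only [List.map_cons, List.sum_cons, if_neg hax]
      rw [ih (List.nodup_cons.mp hnd).2 hx']
      ring

theorem sum_split (f : String → Int) (x : String) (t : List String) :
    ∀ (s : List String),
      (s.map (fun k => f k * ((x :: t).count k : Int))).sum
        = (s.map (fun k => f k * (t.count k : Int))).sum
          + (s.map (fun k => if k = x then f k else 0)).sum := by
  intro s
  induction s with
  | nil => simp
  | cons a r ihs =>
    simp only [List.map_cons, List.sum_cons]
    rw [ihs]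
    have hc : ((x :: t).count a : Int) = (t.count a : Int) + (if a = x then 1 else 0) := by
      rw [List.count_cons]
      rcases eq_or_ne a x with h | h
      · simp [h]
      · simp [h, Ne.symm h]
    rw [hc]
    split_ifs <;> ring

theorem weighted_count_sum (f : String → Int) :
    ∀ (l s : List String), s.Nodup → (∀ y ∈ l, y ∈ s) →
      (s.map (fun k => f k * (l.count k : Int))).sum = (l.map f).sum := by
  intro l
  induction l with
  | nil => intro s _ _; simp
  | cons x t ih =>
    intro s hnd hsub
    rw [sum_split f x t s, ih s hnd (fun y hy => hsub y (List.mem_cons_of_mem x hy)),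
        sum_ite_pick f x s hnd (hsub x (List.mem_cons_self))]
    simp [add_comm]

theorem portB_eq_sum (bands : List String) : get_nb_bands_alt bands = (bands.map pvW).sum := by
  simp only [get_nb_bands_alt, PySem.Dict.foldl_insert_getD_add_one_eq_counter,
    PySem.Dict.items_counter, PySem.List.foldl_add, List.map_map, zero_add]
  have he : (List.map ((fun p => pvWeights.getD p.1 0 * p.2) ∘ fun k => (k, (bands.count k : Int)))
        (PySem.Set.ofList bands))
      = ((PySem.Set.ofList bands).map (fun k => pvW k * (bands.count k : Int))) := by
    apply List.map_congr_left
    intro k _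
    simp [Function.comp, pvWeights_getD]
  rw [he]
  exact weighted_count_sum pvW bands (PySem.Set.ofList bands) (PySem.Set.nodup_ofList bands)
    (fun y hy => (PySem.Set.mem_ofList bands y).mpr hy)

-- ===== VERDICT (by name: the statement is the Claim_ definition above) =====
theorem get_nb_bands_spec : Claim_equal_get_nb_bands := by
  intro bands _
  unfold Spec_get_nb_bands
  rw [portA_eq_sum, portB_eq_sum]
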